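-- pv_equiv track=rewrite | github.com/jcoludar/taxembed | src/taxembed/visualization/umap_viz.py | get_nodes_at_depth
-- ===== SOURCE A (Python) =====
-- def get_nodes_at_depth(root_taxid, parent_children, depth):
--     """Get all nodes at a specific depth from root (0=children, 1=grandchildren, etc.)."""
--     if depth == 0:
--         return parent_children.get(root_taxid, [])
--
--     current_level = [root_taxid]
--     for _ in range(depth):
--         next_level = []
--         for node in current_level:
--             next_level.extend(parent_children.get(node, []))
--         current_level = next_level
--         if not current_level:
--             break
--     return current_level
-- ===== SOURCE B (Python) =====
-- def get_nodes_at_depth(root_taxid, parent_children, depth):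
--     """Get all nodes at a specific depth from root (0=children, 1=grandchildren, etc.)."""
--     if depth == 0:
--         return parent_children.get(root_taxid, [])
--     result = []
--     stack = [(root_taxid, depth)]
--     while stack:
--         node, d = stack.pop()
--         if d <= 0:
--             result.append(node)
--         else:
--             for child in reversed(parent_children.get(node, [])):
--                 stack.append((child, d - 1))
--     return result
-- ===== Notes on version B (the rewrite author's own statement) =====
-- stated objective: alternative
-- what changed: Replaced A's level-by-level BFS (rebuilding a whole frontier list per depth step) with an explicit-stack depth-first traversal that pops (node, remaining-depth) pairs and appends exact-depth descendants left to right.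
import Mathlib
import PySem

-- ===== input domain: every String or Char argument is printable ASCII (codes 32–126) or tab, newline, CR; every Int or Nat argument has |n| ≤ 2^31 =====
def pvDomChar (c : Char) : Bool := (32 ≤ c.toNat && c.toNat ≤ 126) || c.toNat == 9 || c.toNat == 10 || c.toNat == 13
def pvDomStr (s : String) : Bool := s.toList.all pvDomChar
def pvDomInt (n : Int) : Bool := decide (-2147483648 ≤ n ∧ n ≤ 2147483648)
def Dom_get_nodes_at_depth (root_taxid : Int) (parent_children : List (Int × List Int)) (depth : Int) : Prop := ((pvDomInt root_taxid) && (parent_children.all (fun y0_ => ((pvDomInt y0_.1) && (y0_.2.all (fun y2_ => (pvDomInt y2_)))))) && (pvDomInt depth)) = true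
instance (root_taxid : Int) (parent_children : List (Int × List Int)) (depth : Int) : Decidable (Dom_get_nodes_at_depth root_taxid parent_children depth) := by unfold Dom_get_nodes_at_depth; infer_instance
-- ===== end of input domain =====

-- B replaces A's iterative level-by-level BFS (rebuilding a whole frontier list per step)
-- with an explicit-stack depth-first traversal collecting the exact-depth descendants
-- left to right (objective: alternative decomposition).

-- ===== PORT A =====
-- the 'for _ in range(depth)' loop (depth.toNat iterations, matching Python's lazy
-- range) with the 'if not current_level: break' early exit
def pvLoopA (parent_children : List (Int × List Int)) : Nat → List Int → List Int
  | 0, current_level => current_level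
  | rest + 1, current_level =>
    let next_level := current_level.foldl
      (fun acc node => acc ++ PySem.Dict.getD ⟨parent_children⟩ node []) []
    if next_level = [] then next_level else pvLoopA parent_children rest next_level

def get_nodes_at_depth (root_taxid : Int) (parent_children : List (Int × List Int)) (depth : Int) : List Int :=
  if depth = 0 then PySem.Dict.getD ⟨parent_children⟩ root_taxid []
  else pvLoopA parent_children depth.toNat [root_taxid]

-- ===== PORT B =====
-- these two definitions and the lemma exist only for pvLoopB's termination measure
def pvFanout (parent_children : List (Int × List Int)) : Nat :=
  (parent_children.map (fun p => p.2.length)).foldr max 0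

theorem pvFanout_bound (parent_children : List (Int × List Int)) (node : Int) :
    (PySem.Dict.getD (PySem.Dict.mk parent_children) node []).length ≤ pvFanout parent_children := by
  rcases h : (PySem.Dict.mk parent_children).get? node with _ | v
  · rw [PySem.Dict.getD_eq_get?_getD, h]; simp
  · rw [PySem.Dict.getD_eq_get?_getD, h, Option.getD_some]
    have hmem : (node, v) ∈ parent_children := PySem.Dict.mem_items_of_get?_eq_some _ h
    clear h
    induction parent_children with
    | nil => cases hmem
    | cons p rest ih =>
      rcases List.mem_cons.mp hmem with h' | h'
      · subst h'; simp [pvFanout]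
      · have := ih h'
        simp only [pvFanout, List.map_cons, List.foldr_cons] at *
        omega

-- the 'while stack:' loop: stack entries (node, d), top of stack = head of list;
-- 'for child in reversed(kids): stack.append((child, d-1))' pushes one by one,
-- leaving kids[0] on top — the reverse.foldl below performs exactly those pushes
def pvLoopB (parent_children : List (Int × List Int)) :
    List (Int × Int) → List Int → List Int
  | [], result => result
  | (node, d) :: stack, result =>
    if d ≤ 0 then pvLoopB parent_children stack (result ++ [node])
    else
      pvLoopB parent_children
        ((PySem.Dict.getD ⟨parent_children⟩ node []).reverse.foldl
          (fun st child => (child, d - 1) :: st) stack)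
        result
termination_by stack _ => (stack.map (fun e => (pvFanout parent_children + 1) ^ e.2.toNat)).sum
decreasing_by
  · have : 1 ≤ (pvFanout parent_children + 1) ^ d.toNat := Nat.one_le_pow _ _ (by omega)
    simp only [List.map_cons, List.sum_cons]
    omega
  · have hrw : (PySem.Dict.getD ⟨parent_children⟩ node []).reverse.foldl
        (fun st child => (child, d - 1) :: st) stack =
        (PySem.Dict.getD ⟨parent_children⟩ node []).map (fun child => (child, d - 1)) ++ stack := by
      generalize PySem.Dict.getD ⟨parent_children⟩ node [] = kids
      induction kids using List.reverseRecOn with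
      | nil => simp
      | append_singleton xs x _ => simp
    rw [hrw]
    simp only [List.map_append, List.map_map, List.sum_append, List.map_cons, List.sum_cons]
    have hlen : (PySem.Dict.getD ⟨parent_children⟩ node []).length ≤ pvFanout parent_children :=
      pvFanout_bound parent_children node
    have hmap : ((PySem.Dict.getD ⟨parent_children⟩ node []).map
        ((fun e => (pvFanout parent_children + 1) ^ e.2.toNat) ∘ fun child => (child, d - 1))).sum =
        (PySem.Dict.getD ⟨parent_children⟩ node []).length *
          (pvFanout parent_children + 1) ^ (d - 1).toNat := by
      simp only [Function.comp_def]
      rw [List.map_const', List.sum_replicate, smul_eq_mul]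
    have hd2 : d.toNat = (d - 1).toNat + 1 := by omega
    have hpow : 0 < (pvFanout parent_children + 1) ^ (d - 1).toNat := Nat.pow_pos (by omega)
    have hkey : (PySem.Dict.getD ⟨parent_children⟩ node []).length *
        (pvFanout parent_children + 1) ^ (d - 1).toNat <
        (pvFanout parent_children + 1) ^ d.toNat := by
      calc (PySem.Dict.getD ⟨parent_children⟩ node []).length *
            (pvFanout parent_children + 1) ^ (d - 1).toNat
          ≤ pvFanout parent_children * (pvFanout parent_children + 1) ^ (d - 1).toNat :=
            Nat.mul_le_mul_right _ hlen
        _ < (pvFanout parent_children + 1) * (pvFanout parent_children + 1) ^ (d - 1).toNat :=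
            (Nat.mul_lt_mul_right hpow).mpr (Nat.lt_succ_self _)
        _ = (pvFanout parent_children + 1) ^ d.toNat := by rw [hd2, pow_succ, mul_comm]
    omega

def get_nodes_at_depth_alt (root_taxid : Int) (parent_children : List (Int × List Int)) (depth : Int) : List Int :=
  if depth = 0 then PySem.Dict.getD ⟨parent_children⟩ root_taxid []
  else pvLoopB parent_children [(root_taxid, depth)] []

-- ===== PRECONDITION & SPEC =====
def Spec_get_nodes_at_depth (root_taxid : Int) (parent_children : List (Int × List Int)) (depth : Int) (out : List Int) : Prop := out = get_nodes_at_depth_alt root_taxid parent_children depth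
instance (root_taxid : Int) (parent_children : List (Int × List Int)) (depth : Int) (out : List Int) : Decidable (Spec_get_nodes_at_depth root_taxid parent_children depth out) := by unfold Spec_get_nodes_at_depth; infer_instance

-- ===== CLAIM (what is proved, stated in full; the proofs are below) =====
def Claim_equal_get_nodes_at_depth : Prop := ∀ (root_taxid : Int) (parent_children : List (Int × List Int)) (depth : Int), Dom_get_nodes_at_depth root_taxid parent_children depth → Spec_get_nodes_at_depth root_taxid parent_children depth (get_nodes_at_depth root_taxid parent_children depth)

-- ===== LEMMAS AND PROOFS =====

-- specification function both loops are reduced to: the exact-depth descendants of one node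
def pvCollect (pc : List (Int × List Int)) (node : Int) (d : Int) : List Int :=
  if d ≤ 0 then [node]
  else (PySem.Dict.getD ⟨pc⟩ node []).flatMap (fun child => pvCollect pc child (d - 1))
termination_by d.toNat
decreasing_by omega

theorem pvCollect_zero (pc : List (Int × List Int)) (node : Int) : pvCollect pc node 0 = [node] := by
  rw [pvCollect]; simp

theorem pvCollect_pos (pc : List (Int × List Int)) (node : Int) (d : Int) (hd : 0 < d) :
    pvCollect pc node d =
      (PySem.Dict.getD ⟨pc⟩ node []).flatMap (fun child => pvCollect pc child (d - 1)) := by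
  rw [pvCollect, if_neg (by omega)]

theorem pvPushes_eq (pc : List (Int × List Int)) (node : Int) (d : Int) (stack : List (Int × Int)) :
    (PySem.Dict.getD ⟨pc⟩ node []).reverse.foldl (fun st child => (child, d - 1) :: st) stack =
      (PySem.Dict.getD ⟨pc⟩ node []).map (fun child => (child, d - 1)) ++ stack := by
  generalize PySem.Dict.getD ⟨pc⟩ node [] = kids
  induction kids using List.reverseRecOn with
  | nil => simp
  | append_singleton xs x _ => simp

-- A's loop over a fuel of n iterations, started from `cur`, returns exactly the
-- concatenation of the depth-n collections from each element of `cur`.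
theorem pvLoopA_eq (pc : List (Int × List Int)) :
    ∀ (n : Nat) (cur : List Int),
      pvLoopA pc n cur = cur.flatMap (fun x => pvCollect pc x (n : Int)) := by
  intro n
  induction n with
  | zero =>
    intro cur
    simp [pvLoopA, pvCollect_zero]
  | succ rest ih =>
    intro cur
    rw [pvLoopA]
    have hnext : cur.foldl (fun acc node => acc ++ PySem.Dict.getD ⟨pc⟩ node []) [] =
        cur.flatMap (fun node => PySem.Dict.getD ⟨pc⟩ node []) := by
      simpa using PySem.List.foldl_append_eq_flatMap
        (fun node => PySem.Dict.getD ⟨pc⟩ node []) cur []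
    have hlen : ((rest + 1 : Nat) : Int) - 1 = (rest : Int) := by push_cast; ring
    have hrhs : cur.flatMap (fun x => pvCollect pc x ((rest + 1 : Nat) : Int)) =
        (cur.flatMap (fun node => PySem.Dict.getD ⟨pc⟩ node [])).flatMap
          (fun x => pvCollect pc x (rest : Int)) := by
      rw [List.flatMap_assoc]
      apply List.flatMap_congr
      intro x _
      rw [pvCollect_pos pc x _ (by positivity), hlen]
    by_cases h : cur.flatMap (fun node => PySem.Dict.getD ⟨pc⟩ node []) = []
    · rw [hnext, if_pos h, hrhs, h, List.flatMap_nil]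
    · rw [hnext, if_neg h, ih, hrhs]

-- B's stack loop invariant: the final result is the pending output followed by
-- the collections of every stack entry, top first.
theorem pvLoopB_eq (pc : List (Int × List Int)) :
    ∀ (stack : List (Int × Int)) (result : List Int),
      pvLoopB pc stack result =
        result ++ stack.flatMap (fun e => pvCollect pc e.1 e.2) := by
  intro stack result
  induction stack, result using pvLoopB.induct pc with
  | case1 result => simp [pvLoopB]
  | case2 node d stack result hd ih =>
    rw [pvLoopB, if_pos hd, ih]
    have hbase : pvCollect pc node d = [node] := by rw [pvCollect, if_pos hd]
    simp [hbase]
  | case3 node d stack result hd ih =>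
    rw [pvLoopB, if_neg hd, ih, pvPushes_eq]
    rw [List.flatMap_cons, List.flatMap_append, List.flatMap_map]
    rw [pvCollect_pos pc node d (by omega)]

-- ===== VERDICT (by name: the statement is the Claim_ definition above) =====
theorem get_nodes_at_depth_spec : Claim_equal_get_nodes_at_depth := by
  intro root pc depth _
  unfold Spec_get_nodes_at_depth get_nodes_at_depth get_nodes_at_depth_alt
  by_cases h0 : depth = 0
  · simp [h0]
  · rw [if_neg h0, if_neg h0, pvLoopA_eq, pvLoopB_eq]
    simp only [List.flatMap_cons, List.flatMap_nil, List.append_nil, List.nil_append]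
    by_cases hpos : 0 < depth
    · have : (depth.toNat : Int) = depth := by omega
      rw [this]
    · have h1 : depth.toNat = 0 := by omega
      rw [h1]
      have hneg : depth ≤ 0 := by omega
      have hcb : pvCollect pc root depth = [root] := by rw [pvCollect, if_pos hneg]
      rw [show ((0 : Nat) : Int) = 0 from rfl, pvCollect_zero, hcb]
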